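-- pv_equiv track=rewrite | github.com/AndrewMonteith/Programming-Problems | missing_words.py | remove_subsequence
-- ===== SOURCE A (Python) =====
-- def remove_subsequence(s, t):
--     words_s, words_t = s.split(" "), t.split(" ")
--
--     t_i = 0 # index of word in words_t we're looking to remove
--     to_remove = set([])
--
--     for i in range(0, len(words_s)):
--         if words_s[i] == words_t[t_i]:
--             to_remove.add(i)
--             t_i += 1
--
--             if t_i == len(words_t):
--                 break
--
--     return [words_s[i] for i in range(0, len(words_s)) if i not in to_remove]
-- ===== SOURCE B (Python) =====
-- def remove_subsequence(s, t):
--     words = s.split(" ")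
--     positions = []
--     start = 0
--     for u in t.split(" "):
--         try:
--             p = words.index(u, start)
--         except ValueError:
--             break
--         positions.append(p)
--         start = p + 1
--     for p in reversed(positions):
--         del words[p]
--     return words
-- ===== Notes on version B (the rewrite author's own statement) =====
-- stated objective: alternative
-- what changed: Instead of A's scan over the words of s collecting a set of matched indices and a second index-filtering pass, B iterates over the words of t, finds each one's next occurrence with list.index(u, start) (breaking on ValueError), then deletes the matched positions back-to-front in place; the explicit scan over s's words and the index set disappear.
import Mathlib
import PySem

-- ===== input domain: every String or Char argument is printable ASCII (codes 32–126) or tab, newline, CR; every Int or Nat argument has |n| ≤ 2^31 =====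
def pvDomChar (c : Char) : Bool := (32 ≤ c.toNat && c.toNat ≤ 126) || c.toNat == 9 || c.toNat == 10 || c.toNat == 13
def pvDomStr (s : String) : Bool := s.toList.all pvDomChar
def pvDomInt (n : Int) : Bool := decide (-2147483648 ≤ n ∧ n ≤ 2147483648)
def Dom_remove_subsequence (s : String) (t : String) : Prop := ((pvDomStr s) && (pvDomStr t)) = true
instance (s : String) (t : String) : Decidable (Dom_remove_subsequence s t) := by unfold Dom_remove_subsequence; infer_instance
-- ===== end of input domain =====

-- B replaces A's scan over s's words (index set + second filtering pass) by a loop over t's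
-- words that locates each next occurrence with list.index and deletes the positions
-- back-to-front; objective: alternative (same result, different traversal).

-- ===== PORT A =====
-- the 'for i in range(0, len(words_s))' loop with its break, over the remaining index list
def removeLoopA (ws wt : List String) : List Nat → Nat → PySem.Set Nat → PySem.Set Nat
  | [], _, rem => rem
  | i :: rest, t_i, rem =>
    if ws.getD i "" = wt.getD t_i "" then
      if t_i + 1 = wt.length then PySem.Set.add rem i
      else removeLoopA ws wt rest (t_i + 1) (PySem.Set.add rem i)
    else removeLoopA ws wt rest t_i rem

def remove_subsequence (s : String) (t : String) : List String :=
  let ws := (PySem.Chars.splitOn s.toList " ".toList).map String.ofList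
  let wt := (PySem.Chars.splitOn t.toList " ".toList).map String.ofList
  let rem := removeLoopA ws wt (List.range ws.length) 0 PySem.Set.empty
  ((List.range ws.length).filter (fun i => !(PySem.Set.contains rem i))).map (fun i => ws.getD i "")

-- ===== PORT B =====
-- the 'for u in t.split(" ")' loop: each words.index(u, start) search; break on ValueError.
-- PySem.List.index? has no start parameter, so 'words.index(u, start)' is ported by hand as
-- a search in 'words.drop start' shifted by start — exact, since 0 ≤ start here.
def findPosB (words : List String) : List String → Nat → List Nat
  | [], _ => []
  | u :: us, start =>
    match (PySem.List.index? (words.drop start) u).map (· + start) with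
    | none => []
    | some p => p :: findPosB words us (p + 1)

def remove_subsequence_alt (s : String) (t : String) : List String :=
  let words := (PySem.Chars.splitOn s.toList " ".toList).map String.ofList
  let positions := findPosB words ((PySem.Chars.splitOn t.toList " ".toList).map String.ofList) 0
  -- 'for p in reversed(positions): del words[p]'; every p is in range, so del = eraseIdx
  positions.reverse.foldl (fun ws p => ws.eraseIdx p) words

-- ===== PRECONDITION & SPEC =====
def Spec_remove_subsequence (s : String) (t : String) (out : List String) : Prop := out = remove_subsequence_alt s t
instance (s : String) (t : String) (out : List String) : Decidable (Spec_remove_subsequence s t out) := by unfold Spec_remove_subsequence; infer_instance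

-- ===== CLAIM (what is proved, stated in full; the proofs are below) =====
def Claim_equal_remove_subsequence : Prop := ∀ (s : String) (t : String), Dom_remove_subsequence s t → Spec_remove_subsequence s t (remove_subsequence s t)

-- ===== LEMMAS AND PROOFS =====

-- common characterisation: remove from ws the greedy leftmost match of the word list us
def pvG : List String → List String → List String
  | ws, [] => ws
  | [], _ :: _ => []
  | w :: ws, u :: us => if w = u then pvG ws us else w :: pvG ws (u :: us)

theorem pvG_nil (us : List String) : pvG [] us = [] := by
  cases us <;> rfl

theorem pvG_nil_right (ws : List String) : pvG ws [] = ws := by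
  cases ws <;> rfl

theorem splitOn_go_ne_nil (sep : List Char) :
    ∀ (fuel : Nat) (l cur : List Char) (acc : List (List Char)),
    PySem.Chars.splitOn.go sep fuel l cur acc ≠ [] := by
  intro fuel
  induction fuel with
  | zero => intro l cur acc; simp [PySem.Chars.splitOn.go]
  | succ n ih =>
    intro l cur acc
    cases l with
    | nil => simp [PySem.Chars.splitOn.go]
    | cons c rest =>
      rw [PySem.Chars.splitOn.go]
      split_ifs with h
      · exact ih _ _ _
      · exact ih _ _ _

theorem splitOn_ne_nil (cs sep : List Char) : PySem.Chars.splitOn cs sep ≠ [] :=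
  splitOn_go_ne_nil sep _ cs [] []

theorem contains_add_ne (rem : PySem.Set Nat) (i j : Nat) (h : j ≠ i) :
    PySem.Set.contains (PySem.Set.add rem i) j = PySem.Set.contains rem j := by
  cases hc : PySem.Set.contains rem j
  · simp only [PySem.Set.contains_eq_listContains, List.contains_eq_mem, decide_eq_false_iff_not] at hc ⊢
    intro hmem
    rcases (PySem.Set.mem_add rem i j).1 hmem with h1 | h1
    · exact hc h1
    · exact h h1
  · simp only [PySem.Set.contains_eq_listContains, List.contains_eq_mem, decide_eq_true_iff] at hc ⊢
    exact (PySem.Set.mem_add rem i j).2 (Or.inl hc)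

theorem contains_add_self (rem : PySem.Set Nat) (i : Nat) :
    PySem.Set.contains (PySem.Set.add rem i) i = true := by
  simp only [PySem.Set.contains_eq_listContains, List.contains_eq_mem, decide_eq_true_iff]
  exact (PySem.Set.mem_add rem i i).2 (Or.inr rfl)

-- the loop never touches indices outside its index list
theorem loopA_contains_notin (ws wt : List String) :
    ∀ (idxs : List Nat) (t_i : Nat) (rem : PySem.Set Nat) (j : Nat), j ∉ idxs →
    PySem.Set.contains (removeLoopA ws wt idxs t_i rem) j = PySem.Set.contains rem j := by
  intro idxs
  induction idxs with
  | nil => intro t_i rem j _; rfl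
  | cons i rest ih =>
    intro t_i rem j hj
    have hji : j ≠ i := by intro e; exact hj (e ▸ List.mem_cons_self)
    have hjr : j ∉ rest := fun h => hj (List.mem_cons_of_mem _ h)
    rw [removeLoopA]
    split_ifs with h1 h2
    · exact contains_add_ne rem i j hji
    · rw [ih _ _ _ hjr, contains_add_ne rem i j hji]
    · exact ih _ _ _ hjr

theorem filter_untouched (ws : List String) :
    ∀ (m k : Nat) (rem : PySem.Set Nat), k + m = ws.length →
    (∀ j, k ≤ j → PySem.Set.contains rem j = false) →
    ((List.range' k m).filter (fun i => !(PySem.Set.contains rem i))).map (fun i => ws.getD i "")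
      = ws.drop k := by
  intro m
  induction m with
  | zero =>
    intro k rem hk _
    simp at hk
    simp [hk, List.drop_length]
  | succ m ih =>
    intro k rem hk hrem
    have hklt : k < ws.length := by omega
    rw [List.range'_succ, List.filter_cons, List.drop_eq_getElem_cons hklt]
    simp only [hrem k le_rfl, Bool.not_false, if_pos]
    rw [List.map_cons, List.getD_eq_getElem ws "" hklt,
        ih (k + 1) rem (by omega) (fun j hj => hrem j (by omega))]

-- A's loop followed by A's filtering comprehension computes pvG on the suffixes
theorem loopA_key (ws wt : List String) :
    ∀ (m k t_i : Nat) (rem : PySem.Set Nat), k + m = ws.length → t_i < wt.length →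
    (∀ j, k ≤ j → PySem.Set.contains rem j = false) →
    ((List.range' k m).filter
        (fun i => !(PySem.Set.contains (removeLoopA ws wt (List.range' k m) t_i rem) i))).map
      (fun i => ws.getD i "")
      = pvG (ws.drop k) (wt.drop t_i) := by
  intro m
  induction m with
  | zero =>
    intro k t_i rem hk ht _
    simp at hk
    simp [hk, List.drop_length, pvG_nil]
  | succ m ih =>
    intro k t_i rem hk ht hrem
    have hklt : k < ws.length := by omega
    have hwdrop : ws.drop k = ws[k] :: ws.drop (k + 1) := List.drop_eq_getElem_cons hklt
    have htdrop : wt.drop t_i = wt[t_i] :: wt.drop (t_i + 1) := List.drop_eq_getElem_cons ht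
    have hwg : ws.getD k "" = ws[k] := List.getD_eq_getElem ws "" hklt
    have htg : wt.getD t_i "" = wt[t_i] := List.getD_eq_getElem wt "" ht
    have hknotin : k ∉ List.range' (k + 1) m := by
      intro h; have := (List.mem_range'_1).1 h; omega
    rw [List.range'_succ, removeLoopA]
    split_ifs with h1 h2
    · -- match, t fully consumed: break
      have heq : ws[k] = wt[t_i] := by rw [← hwg, ← htg, h1]
      have htail : wt.drop (t_i + 1) = [] := by rw [h2]; exact List.drop_length
      rw [List.filter_cons_of_neg (p := fun i => !(PySem.Set.contains (PySem.Set.add rem k) i))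
        (by intro hcon; simp only [contains_add_self] at hcon; simp at hcon)]
      rw [filter_untouched ws m (k + 1) _ (by omega)
            (fun j hj => by rw [contains_add_ne rem k j (by omega)]; exact hrem j (by omega))]
      rw [hwdrop, htdrop, pvG, if_pos heq, htail, pvG]
    · -- match, continue
      have heq : ws[k] = wt[t_i] := by rw [← hwg, ← htg, h1]
      have ht' : t_i + 1 < wt.length := by omega
      have hck : PySem.Set.contains
          (removeLoopA ws wt (List.range' (k + 1) m) (t_i + 1) (PySem.Set.add rem k)) k = true := by
        rw [loopA_contains_notin ws wt _ _ _ _ hknotin]; exact contains_add_self rem k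
      rw [List.filter_cons_of_neg
        (p := fun i => !(PySem.Set.contains
          (removeLoopA ws wt (List.range' (k + 1) m) (t_i + 1) (PySem.Set.add rem k)) i))
        (by intro hcon; simp only [hck] at hcon; simp at hcon)]
      rw [ih (k + 1) (t_i + 1) (PySem.Set.add rem k) (by omega) ht'
            (fun j hj => by rw [contains_add_ne rem k j (by omega)]; exact hrem j (by omega))]
      rw [hwdrop, htdrop, pvG, if_pos heq]
    · -- no match: word k is kept
      have hne : ws[k] ≠ wt[t_i] := by rw [← hwg, ← htg]; exact h1
      have hck : PySem.Set.contains (removeLoopA ws wt (List.range' (k + 1) m) t_i rem) k = false := by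
        rw [loopA_contains_notin ws wt _ _ _ _ hknotin]; exact hrem k le_rfl
      rw [List.filter_cons_of_pos
        (p := fun i => !(PySem.Set.contains (removeLoopA ws wt (List.range' (k + 1) m) t_i rem) i))
        (by simp only [hck]; rfl)]
      rw [List.map_cons, hwg,
          ih (k + 1) t_i rem (by omega) ht (fun j hj => hrem j (by omega))]
      rw [hwdrop, htdrop, pvG, if_neg hne]

-- greedy removal skips a u-free prefix
theorem pvG_not_mem (u : String) (us : List String) :
    ∀ ws : List String, u ∉ ws → pvG ws (u :: us) = ws := by
  intro ws
  induction ws with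
  | nil => intro _; exact pvG_nil _
  | cons w rest ih =>
    intro h
    have hw : w ≠ u := by intro e; exact h (e ▸ List.mem_cons_self)
    rw [pvG, if_neg hw, ih (fun hm => h (List.mem_cons_of_mem _ hm))]

-- greedy removal through the first occurrence of u
theorem pvG_index (ws : List String) (u : String) (us : List String) (q : Nat)
    (h : PySem.List.index? ws u = some q) :
    pvG ws (u :: us) = ws.take q ++ pvG (ws.drop (q + 1)) us := by
  obtain ⟨pre, suf, hws, hlen, hnot⟩ := (PySem.List.index?_eq_some_iff ws u q).1 h
  subst hws
  have htake : (pre ++ u :: suf).take pre.length = pre := by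
    simp
  have hdropq : (pre ++ u :: suf).drop (pre.length + 1) = suf := by
    have e1 : List.drop (pre.length + 1) pre = [] := List.drop_eq_nil_of_le (by omega)
    have e2 : pre.length + 1 - pre.length = 1 := by omega
    rw [List.drop_append, e1, e2, List.nil_append, List.drop_one, List.tail_cons]
  rw [← hlen, htake, hdropq]
  clear h htake hdropq hlen
  induction pre with
  | nil => simp [pvG]
  | cons w rest ih =>
    have hw : w ≠ u := by intro e; exact hnot (e ▸ List.mem_cons_self)
    rw [List.cons_append, pvG, if_neg hw, ih (fun hm => hnot (List.mem_cons_of_mem _ hm))]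
    rfl

-- B's position list, deleted back-to-front, computes pvG on the suffix of words
theorem findPosB_key (words : List String) :
    ∀ (us : List String) (start : Nat), start ≤ words.length →
    (findPosB words us start).foldr (fun p ws => ws.eraseIdx p) words
      = words.take start ++ pvG (words.drop start) us := by
  intro us
  induction us with
  | nil =>
    intro start _
    rw [findPosB, List.foldr_nil, pvG_nil_right, List.take_append_drop]
  | cons u rest ih =>
    intro start hstart
    rw [findPosB]
    cases hidx : PySem.List.index? (words.drop start) u with
    | none =>
      have hnm : u ∉ words.drop start := (PySem.List.index?_eq_none_iff _ _).1 hidx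
      rw [pvG_not_mem u rest _ hnm]
      simp [List.take_append_drop]
    | some q =>
      obtain ⟨hq, _, _⟩ := PySem.List.getElem_of_index?_eq_some hidx
      have hqlt : q + start < words.length := by
        have := words.length_drop (i := start); omega
      simp only [Option.map_some]
      rw [List.foldr_cons, ih (q + start + 1) (by omega)]
      have hlen1 : (words.take (q + start + 1)).length = q + start + 1 := by
        rw [List.length_take]; omega
      have hL : (words.take (q + start + 1) ++ pvG (words.drop (q + start + 1)) rest).eraseIdx (q + start)
          = words.take (q + start) ++ pvG (words.drop (q + start + 1)) rest := by
        rw [List.eraseIdx_eq_take_drop_succ,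
            List.take_append_of_le_length (by omega), List.take_take, min_eq_left (by omega)]
        congr 1
        have e1 : List.drop (q + start + 1) (words.take (q + start + 1)) = [] :=
          List.drop_eq_nil_of_le (by omega)
        have e2 : q + start + 1 - (words.take (q + start + 1)).length = 0 := by omega
        rw [List.drop_append, e1, e2, List.nil_append, List.drop_zero]
      rw [hL, pvG_index (words.drop start) u rest q hidx, ← List.append_assoc]
      congr 1
      · rw [show q + start = start + q by omega, List.take_add]
      · congr 1
        rw [List.drop_drop]
        congr 1
        omega

-- ===== VERDICT (by name: the statement is the Claim_ definition above) =====
theorem remove_subsequence_spec : Claim_equal_remove_subsequence := by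
  intro s t _
  unfold Spec_remove_subsequence remove_subsequence remove_subsequence_alt
  have hwt : ((PySem.Chars.splitOn t.toList " ".toList).map String.ofList) ≠ [] := by
    simp only [ne_eq, List.map_eq_nil_iff]
    exact splitOn_ne_nil _ _
  have hwtlen : 0 < ((PySem.Chars.splitOn t.toList " ".toList).map String.ofList).length :=
    List.length_pos_iff.2 hwt
  set ws := (PySem.Chars.splitOn s.toList " ".toList).map String.ofList with hws
  set wt := (PySem.Chars.splitOn t.toList " ".toList).map String.ofList with hwtdef
  have hA := loopA_key ws wt ws.length 0 0 PySem.Set.empty (by omega) hwtlen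
      (fun j _ => rfl)
  have hB := findPosB_key ws wt 0 (by omega)
  simp only [List.range_eq_range'] at hA ⊢
  simp only [List.drop_zero] at hA
  simp only [List.take_zero, List.drop_zero, List.nil_append] at hB
  rw [hA, List.foldl_reverse]
  simpa using hB.symm
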